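-- pv_equiv track=rewrite | github.com/andrew-chaney/Advent-of-Code | 2015/Day_17/main.py | findMinNeeded
-- ===== SOURCE A (Python) =====
-- from itertools import combinations
--
-- def findMinNeeded(containers: list[int], amt: int) -> int:
--     min_containers = len(containers)
--     for i in range(1, len(containers)):
--         possibilities = combinations(containers, i)
--         for x in possibilities:
--             if sum(list(x)) == amt:
--                 if len(list(x)) < min_containers:
--                     min_containers = len(list(x))
--     return min_containers
-- ===== SOURCE B (Python) =====
-- def findMinNeeded(containers: list[int], amt: int) -> int:
--     memo = {}
--
--     def best(i, s):
--         # min size of a NONEMPTY subsequence of containers[i:] summing to s, or None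
--         if i == len(containers):
--             return None
--         if (i, s) in memo:
--             return memo[(i, s)]
--         c = containers[i]
--         res = best(i + 1, s)            # skip containers[i]
--         if s == c:
--             res = 1                     # containers[i] alone is optimal (all sizes >= 1)
--         took = best(i + 1, s - c)       # containers[i] plus a nonempty rest
--         if took is not None and (res is None or took + 1 < res):
--             res = took + 1
--         memo[(i, s)] = res
--         return res
--
--     r = best(0, amt)
--     return len(containers) if r is None else min(len(containers), r)
-- ===== Notes on version B (the rewrite author's own statement) =====
-- stated objective: faster
-- what changed: B replaces A's brute-force enumeration of all combinations of every size with a memoized top-down recursion over (suffix index, remaining amount) that returns the minimum size of a nonempty subset summing to the target.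
import Mathlib
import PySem

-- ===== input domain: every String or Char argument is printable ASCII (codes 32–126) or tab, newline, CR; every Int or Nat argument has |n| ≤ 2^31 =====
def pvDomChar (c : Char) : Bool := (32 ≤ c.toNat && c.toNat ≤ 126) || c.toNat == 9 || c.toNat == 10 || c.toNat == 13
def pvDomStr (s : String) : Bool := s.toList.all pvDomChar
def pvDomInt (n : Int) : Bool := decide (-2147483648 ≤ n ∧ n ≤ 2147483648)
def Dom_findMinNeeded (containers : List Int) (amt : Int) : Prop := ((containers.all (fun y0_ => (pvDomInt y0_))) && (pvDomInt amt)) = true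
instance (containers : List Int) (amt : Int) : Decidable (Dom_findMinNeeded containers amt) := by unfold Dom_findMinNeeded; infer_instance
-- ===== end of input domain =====

-- B replaces A's brute-force enumeration of all combinations by a memoized recursion
-- over (suffix, remaining amount); B's memoization is ported as the same plain recursion
-- (it changes cost only, never a computed value).

-- ===== PORT A =====
-- literal port of A: min_containers starts at len; for i in range(1, len): for x in combinations(containers, i): …
def findMinNeeded (containers : List Int) (amt : Int) : Int :=
  (PySem.List.pyRange 1 (containers.length : Int) 1).foldl
    (fun m i =>
      (PySem.List.combinations containers i.toNat).foldl
        (fun m x => if x.sum = amt then (if (x.length : Int) < m then (x.length : Int) else m) else m)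
        m)
    (containers.length : Int)

-- ===== PORT B =====
-- port of Source B's helper best(i, s) (recursion on the suffix containers[i:]; memo dropped):
-- minimum size of a nonempty subsequence of the suffix summing to s, none if impossible
def pvBestB : List Int → Int → Option Int
  | [], _ => none
  | c :: rest, s =>
    let res := pvBestB rest s
    let res := if s = c then some 1 else res
    match pvBestB rest (s - c), res with
    | some t, none => some (t + 1)
    | some t, some r => some (if t + 1 < r then t + 1 else r)
    | none, r => r

def findMinNeeded_alt (containers : List Int) (amt : Int) : Int :=
  match pvBestB containers amt with
  | none => (containers.length : Int)
  | some r => min (containers.length : Int) r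

-- ===== PRECONDITION & SPEC =====
def Spec_findMinNeeded (containers : List Int) (amt : Int) (out : Int) : Prop := out = findMinNeeded_alt containers amt
instance (containers : List Int) (amt : Int) (out : Int) : Decidable (Spec_findMinNeeded containers amt out) := by unfold Spec_findMinNeeded; infer_instance

-- ===== CLAIM (what is proved, stated in full; the proofs are below) =====
def Claim_equal_findMinNeeded : Prop := ∀ (containers : List Int) (amt : Int), Dom_findMinNeeded containers amt → Spec_findMinNeeded containers amt (findMinNeeded containers amt)

-- ===== LEMMAS AND PROOFS =====

-- "some nonempty sublist of l sums to amt and has length k"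
def pvAch (l : List Int) (amt k : Int) : Prop :=
  ∃ sub : List Int, sub.Sublist l ∧ sub ≠ [] ∧ sub.sum = amt ∧ (sub.length : Int) = k

-- the inner-loop step of A
def pvStepA (amt : Int) (m : Int) (x : List Int) : Int :=
  if x.sum = amt then (if (x.length : Int) < m then (x.length : Int) else m) else m

lemma pvStepA_le (amt m : Int) (x : List Int) : pvStepA amt m x ≤ m := by
  unfold pvStepA; split_ifs <;> omega

lemma foldA_le_init (amt : Int) (L : List (List Int)) :
    ∀ m, L.foldl (pvStepA amt) m ≤ m := by
  induction L with
  | nil => intro m; simp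
  | cons x t ih =>
    intro m
    calc (x :: t).foldl (pvStepA amt) m = t.foldl (pvStepA amt) (pvStepA amt m x) := rfl
      _ ≤ pvStepA amt m x := ih _
      _ ≤ m := pvStepA_le amt m x

lemma foldA_le_mem (amt : Int) (L : List (List Int)) :
    ∀ m x, x ∈ L → x.sum = amt → L.foldl (pvStepA amt) m ≤ (x.length : Int) := by
  induction L with
  | nil => intro m x hx; simp at hx
  | cons y t ih =>
    intro m x hx hs
    rcases List.mem_cons.mp hx with h | h
    · subst h
      have h1 : t.foldl (pvStepA amt) (pvStepA amt m x) ≤ pvStepA amt m x := foldA_le_init amt t _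
      have h2 : pvStepA amt m x ≤ (x.length : Int) := by
        unfold pvStepA; simp [hs]; split_ifs <;> omega
      calc (x :: t).foldl (pvStepA amt) m = t.foldl (pvStepA amt) (pvStepA amt m x) := rfl
        _ ≤ _ := h1
        _ ≤ _ := h2
    · exact ih _ x h hs

lemma foldA_achieved (l : List Int) (amt : Int) (n : Int) (L : List (List Int)) :
    ∀ m, (∀ x ∈ L, x.Sublist l ∧ x ≠ []) → (m = n ∨ pvAch l amt m) →
      (L.foldl (pvStepA amt) m = n ∨ pvAch l amt (L.foldl (pvStepA amt) m)) := by
  induction L with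
  | nil => intro m _ h; simpa using h
  | cons y t ih =>
    intro m hL h
    have hy := hL y (List.mem_cons_self ..)
    have hstep : pvStepA amt m y = m ∨ pvAch l amt (pvStepA amt m y) := by
      unfold pvStepA
      split_ifs with h1 h2
      · exact Or.inr ⟨y, hy.1, hy.2, h1, rfl⟩
      · exact Or.inl rfl
      · exact Or.inl rfl
    have : pvStepA amt m y = n ∨ pvAch l amt (pvStepA amt m y) := by
      rcases hstep with h' | h'
      · rw [h']; exact h
      · exact Or.inr h'
    exact ih _ (fun x hx => hL x (List.mem_cons_of_mem _ hx)) this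

-- characterization of A's value: flatten the nested loops
def pvCands (l : List Int) : List (List Int) :=
  (PySem.List.pyRange 1 (l.length : Int) 1).flatMap (fun i => PySem.List.combinations l i.toNat)

lemma foldl_flatMap_eq {α β γ : Type} (f : α → List β) (g : γ → β → γ) :
    ∀ (L : List α) (init : γ),
      (L.flatMap f).foldl g init = L.foldl (fun acc a => (f a).foldl g acc) init := by
  intro L
  induction L with
  | nil => intro init; simp
  | cons a t ih => intro init; simp [List.flatMap_cons, List.foldl_append, ih]

lemma findMinNeeded_eq_fold (l : List Int) (amt : Int) :
    findMinNeeded l amt = (pvCands l).foldl (pvStepA amt) (l.length : Int) := by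
  unfold findMinNeeded pvCands pvStepA
  rw [foldl_flatMap_eq]

lemma mem_pvCands (l : List Int) (x : List Int) (hx : x ∈ pvCands l) :
    x.Sublist l ∧ x ≠ [] := by
  unfold pvCands at hx
  rcases List.mem_flatMap.mp hx with ⟨i, hi, hxi⟩
  have hi' := (PySem.List.mem_pyRange_one).mp hi
  have h1 := PySem.List.sublist_of_mem_combinations hxi
  have h2 := PySem.List.length_of_mem_combinations hxi
  refine ⟨h1, ?_⟩
  intro hnil
  subst hnil
  simp at h2
  omega

lemma sub_mem_pvCands (l : List Int) (sub : List Int)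
    (hsl : sub.Sublist l) (hne : sub ≠ []) (hlt : sub.length < l.length) :
    sub ∈ pvCands l := by
  unfold pvCands
  refine List.mem_flatMap.mpr ⟨(sub.length : Int), ?_, ?_⟩
  · refine (PySem.List.mem_pyRange_one).mpr ⟨?_, ?_⟩
    · have : 0 < sub.length := List.length_pos_iff.mpr hne
      omega
    · exact_mod_cast hlt
  · exact (PySem.List.mem_combinations_iff _ _ _).mpr ⟨hsl, by simp⟩

-- A's value is n or achieved
lemma RA_achieved (l : List Int) (amt : Int) :
    findMinNeeded l amt = (l.length : Int) ∨ pvAch l amt (findMinNeeded l amt) := by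
  rw [findMinNeeded_eq_fold]
  exact foldA_achieved l amt _ _ _ (fun x hx => mem_pvCands l x hx) (Or.inl rfl)

lemma RA_le_n (l : List Int) (amt : Int) : findMinNeeded l amt ≤ (l.length : Int) := by
  rw [findMinNeeded_eq_fold]; exact foldA_le_init amt _ _

lemma RA_min (l : List Int) (amt k : Int) (h : pvAch l amt k) : findMinNeeded l amt ≤ k := by
  rcases h with ⟨sub, hsl, hne, hs, hk⟩
  by_cases hlt : sub.length < l.length
  · rw [findMinNeeded_eq_fold]
    have := foldA_le_mem amt (pvCands l) (l.length : Int) sub (sub_mem_pvCands l sub hsl hne hlt) hs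
    omega
  · have hle : sub.length ≤ l.length := hsl.length_le
    have : sub.length = l.length := by omega
    have := RA_le_n l amt
    omega

-- ===== B-side characterization =====

lemma pvBestB_achieved (l : List Int) :
    ∀ (s k : Int), pvBestB l s = some k → pvAch l s k := by
  induction l with
  | nil => intro s k h; simp [pvBestB] at h
  | cons c rest ih =>
    intro s k h
    simp only [pvBestB] at h
    rcases htook : pvBestB rest (s - c) with _ | t <;>
      rcases hres : (if s = c then some 1 else pvBestB rest s) with _ | r <;>
        simp only [htook, hres] at h
    · exact absurd h (by simp)
    · -- took none, res some r : result r
      have hk : r = k := by simpa using h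
      subst hk
      by_cases hc : s = c
      · refine ⟨[c], List.Sublist.cons₂ c (List.nil_sublist rest), by simp, by simp [hc], ?_⟩
        simp [hc] at hres
        simp
        omega
      · simp [hc] at hres
        rcases ih s r hres with ⟨sub, h1, h2, h3, h4⟩
        exact ⟨sub, h1.cons c, h2, h3, h4⟩
    · -- took some t, res none : result t + 1
      have hk : t + 1 = k := by simpa using h
      rcases ih (s - c) t htook with ⟨sub, h1, h2, h3, h4⟩
      refine ⟨c :: sub, List.Sublist.cons₂ c h1, by simp, by simp [h3], by simp [← hk, ← h4]⟩
    · -- took some t, res some r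
      have hk : (if t + 1 < r then t + 1 else r) = k := by simpa using h
      by_cases hlt : t + 1 < r
      · rcases ih (s - c) t htook with ⟨sub, h1, h2, h3, h4⟩
        refine ⟨c :: sub, List.Sublist.cons₂ c h1, by simp, by simp [h3], ?_⟩
        simp [hlt] at hk
        simp [← hk, ← h4]
      · simp [hlt] at hk
        subst hk
        by_cases hc : s = c
        · refine ⟨[c], List.Sublist.cons₂ c (List.nil_sublist rest), by simp, by simp [hc], ?_⟩
          simp [hc] at hres
          simp
          omega
        · simp [hc] at hres
          rcases ih s r hres with ⟨sub, h1, h2, h3, h4⟩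
          exact ⟨sub, h1.cons c, h2, h3, h4⟩

lemma pvBestB_pos (l : List Int) (s k : Int) (h : pvBestB l s = some k) : 1 ≤ k := by
  rcases pvBestB_achieved l s k h with ⟨sub, _, hne, _, hk⟩
  have : 0 < sub.length := List.length_pos_iff.mpr hne
  omega

lemma pvBestB_min (l : List Int) :
    ∀ (s : Int) (sub : List Int), sub.Sublist l → sub ≠ [] → sub.sum = s →
      ∃ k, pvBestB l s = some k ∧ k ≤ (sub.length : Int) := by
  induction l with
  | nil =>
    intro s sub hsl hne _
    exact absurd (List.sublist_nil.mp hsl) hne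
  | cons c rest ih =>
    intro s sub hsl hne hs
    rcases List.sublist_cons_iff.mp hsl with hsub | ⟨r', hr1, hr2⟩
    · -- sub avoids c : recurse, result can only improve on res
      rcases ih s sub hsub hne hs with ⟨k', hk', hle⟩
      simp only [pvBestB]
      rcases htook : pvBestB rest (s - c) with _ | t
      · by_cases hc : s = c
        · exact ⟨1, by simp [hc], by have := pvBestB_pos rest s k' hk'; omega⟩
        · exact ⟨k', by simp [hc, hk'], hle⟩
      · by_cases hc : s = c
        · refine ⟨if t + 1 < 1 then t + 1 else 1, by simp [hc], ?_⟩
          have ht := pvBestB_pos rest (s - c) t htook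
          have hp := pvBestB_pos rest s k' hk'
          split_ifs <;> omega
        · refine ⟨if t + 1 < k' then t + 1 else k', by simp [hc, hk'], ?_⟩
          split_ifs <;> omega
    · -- sub = c :: r'
      subst hr1
      simp only [pvBestB]
      by_cases hr'nil : r' = []
      · subst hr'nil
        have hc : s = c := by simpa using hs.symm
        rcases htook : pvBestB rest (s - c) with _ | t
        · exact ⟨1, by simp [hc], by simp⟩
        · refine ⟨if t + 1 < 1 then t + 1 else 1, by simp [hc], ?_⟩
          have := pvBestB_pos rest (s - c) t htook
          split_ifs <;> simp
          omega
      · have hsum' : r'.sum = s - c := by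
          have : c + r'.sum = s := by simpa using hs
          omega
        rcases ih (s - c) r' hr2 hr'nil hsum' with ⟨t, ht, htle⟩
        rcases hres : (if s = c then some 1 else pvBestB rest s) with _ | r
        · exact ⟨t + 1, by simp [ht], by simp; omega⟩
        · refine ⟨if t + 1 < r then t + 1 else r, by simp [ht], ?_⟩
          split_ifs <;> simp <;> omega

lemma RB_achieved (l : List Int) (amt : Int) :
    findMinNeeded_alt l amt = (l.length : Int) ∨ pvAch l amt (findMinNeeded_alt l amt) := by
  rcases h : pvBestB l amt with _ | r
  · left; simp [findMinNeeded_alt, h]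
  · by_cases hle : r ≤ (l.length : Int)
    · right
      have he : findMinNeeded_alt l amt = r := by
        simp only [findMinNeeded_alt, h]
        omega
      rw [he]
      exact pvBestB_achieved l amt r h
    · left
      simp only [findMinNeeded_alt, h]
      omega

lemma RB_le_n (l : List Int) (amt : Int) : findMinNeeded_alt l amt ≤ (l.length : Int) := by
  rcases h : pvBestB l amt with _ | r
  · simp [findMinNeeded_alt, h]
  · simp only [findMinNeeded_alt, h]
    omega

lemma RB_min (l : List Int) (amt k : Int) (h : pvAch l amt k) : findMinNeeded_alt l amt ≤ k := by
  rcases h with ⟨sub, hsl, hne, hs, hk⟩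
  rcases pvBestB_min l amt sub hsl hne hs with ⟨k', hk', hle⟩
  simp only [findMinNeeded_alt, hk']
  have := pvBestB_pos l amt k' hk'
  omega

-- ===== VERDICT (by name: the statement is the Claim_ definition above) =====
theorem findMinNeeded_spec : Claim_equal_findMinNeeded := by
  intro containers amt _
  unfold Spec_findMinNeeded
  have h1 : findMinNeeded containers amt ≤ findMinNeeded_alt containers amt := by
    rcases RB_achieved containers amt with h | h
    · rw [h]; exact RA_le_n containers amt
    · exact RA_min containers amt _ h
  have h2 : findMinNeeded_alt containers amt ≤ findMinNeeded containers amt := by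
    rcases RA_achieved containers amt with h | h
    · rw [h]; exact RB_le_n containers amt
    · exact RB_min containers amt _ h
  omega
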